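-- pv_equiv track=rewrite | github.com/ivanderson2066/assistente-seraphine | assistente virtual/funcoes.py | _remove_leading_terms
-- ===== SOURCE A (Python) =====
-- def _remove_leading_terms(text, terms):
--     result = text.strip()
--     changed = True
--     while changed and result:
--         changed = False
--         for term in terms:
--             prefix = f"{term} "
--             if result.startswith(prefix):
--                 result = result[len(prefix):].strip()
--                 changed = True
--     return result
-- ===== SOURCE B (Python) =====
-- def _remove_leading_terms(text, terms):
--     # cursor-based: walk an index over the stripped string instead of re-slicing it
--     s = text.strip()
--     n = len(s)
--
--     def advance(i):
--         for term in terms: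
--             t = len(term)
--             if s.startswith(term, i) and i + t < n and s[i + t] == ' ':
--                 i = i + t + 1
--                 while i < n and s[i].isspace():
--                     i += 1
--         return i
--
--     i = 0
--     j = advance(0)
--     while j != i:
--         i = j
--         j = advance(i)
--     return s[i:]
-- ===== Notes on version B (the rewrite author's own statement) =====
-- stated objective: alternative
-- what changed: Replaces A's loop over a shrinking string (repeated slice + strip, building a new string at every successful match) by a cursor algorithm: the text is stripped once and an integer index is walked forward over it (skipping the matched prefix and the following whitespace in place), the result being one final suffix slice.
import Mathlib
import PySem

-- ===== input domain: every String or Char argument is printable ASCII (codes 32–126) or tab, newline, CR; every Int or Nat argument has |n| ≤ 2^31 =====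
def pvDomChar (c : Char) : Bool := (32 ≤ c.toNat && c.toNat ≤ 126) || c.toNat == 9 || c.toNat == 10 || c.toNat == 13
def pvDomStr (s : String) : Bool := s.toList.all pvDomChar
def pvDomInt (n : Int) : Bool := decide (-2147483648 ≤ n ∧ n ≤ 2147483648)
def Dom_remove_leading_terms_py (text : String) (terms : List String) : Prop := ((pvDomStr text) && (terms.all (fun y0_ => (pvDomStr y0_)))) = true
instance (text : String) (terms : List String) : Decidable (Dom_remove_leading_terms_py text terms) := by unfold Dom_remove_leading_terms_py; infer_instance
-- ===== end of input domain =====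

-- B replaces A's repeated slice-and-strip on a shrinking string by a cursor (index) walked over
-- the once-stripped string: no intermediate strings are built; same return value (alternative).


-- ===== PORT A =====
-- inner 'for term in terms' body: state = (result, changed)
def pvStepA (st : List Char × Bool) (term : List Char) : List Char × Bool :=
  let pfx := term ++ [' ']
  if PySem.Chars.startswith st.1 pfx then
    (PySem.Chars.strip (PySem.List.slice st.1 (some (PySem.Chars.len pfx)) none), true)
  else st

-- termination facts for A's while loop (cited by name in decreasing_by)
theorem pvStrip_le (s : List Char) : (PySem.Chars.strip s).length ≤ s.length := by
  have h1 := List.length_dropWhile_le PySem.Chars.isspace ((List.dropWhile PySem.Chars.isspace s).reverse)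
  have h2 := List.length_dropWhile_le PySem.Chars.isspace s
  simp only [PySem.Chars.strip, PySem.Chars.rstrip, PySem.Chars.lstrip, List.length_reverse] at *
  omega

theorem pvStep_lt (s t : List Char) (h : PySem.Chars.startswith s (t ++ [' ']) = true) :
    (PySem.Chars.strip (PySem.List.slice s (some (PySem.Chars.len (t ++ [' ']))) none)).length < s.length := by
  have hp : (t ++ [' ']).length ≤ s.length :=
    (List.isPrefixOf_iff_prefix.mp (by simpa [PySem.Chars.startswith] using h)).length_le
  have hslice : PySem.List.slice s (some (PySem.Chars.len (t ++ [' ']))) none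
      = s.drop (t ++ [' ']).length := by
    simpa [PySem.Chars.len] using PySem.List.slice_from_natCast s (t ++ [' ']).length
  rw [hslice]
  have h1 := pvStrip_le (s.drop (t ++ [' ']).length)
  simp only [List.length_drop, List.length_append, List.length_cons, List.length_nil] at *
  omega

theorem pvFoldA_len : ∀ (ts : List (List Char)) (s : List Char) (c : Bool),
    (List.foldl pvStepA (s, c) ts).1.length ≤ s.length ∧
    ((List.foldl pvStepA (s, c) ts).2 = true → c = true ∨ (List.foldl pvStepA (s, c) ts).1.length < s.length)
  | [], s, c => by simp
  | t :: ts, s, c => by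
    simp only [List.foldl_cons, pvStepA]
    by_cases hsw : PySem.Chars.startswith s (t ++ [' ']) = true
    · simp only [hsw, if_pos]
      have hlt := pvStep_lt s t hsw
      have ih := pvFoldA_len ts (PySem.Chars.strip (PySem.List.slice s (some (PySem.Chars.len (t ++ [' ']))) none)) true
      exact ⟨by omega, fun _ => Or.inr (by omega)⟩
    · simp only [hsw, if_neg, Bool.false_eq_true, not_false_iff]
      exact pvFoldA_len ts s c

-- while changed and result: …
def pvLoopA (terms : List (List Char)) (r : List Char) : List Char :=
  if r = [] then r
  else
    if hc : (List.foldl pvStepA (r, false) terms).2 = true then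
      pvLoopA terms (List.foldl pvStepA (r, false) terms).1
    else (List.foldl pvStepA (r, false) terms).1
termination_by r.length
decreasing_by
  simp only [List.foldl_attach] at hc ⊢
  rcases (pvFoldA_len terms r false).2 hc with h | h
  · exact absurd h (by simp)
  · exact h

def remove_leading_terms_py (text : String) (terms : List String) : String :=
  String.ofList (pvLoopA (terms.map (fun t => t.toList)) (PySem.Chars.strip text.toList))

-- ===== PORT B =====
-- inner 'while i < n and s[i].isspace(): i += 1'
def pvSkipWs (cs : List Char) (i : Nat) : Nat :=
  if h : i < cs.length then
    if PySem.Chars.isspace cs[i] then pvSkipWs cs (i + 1) else i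
  else i
termination_by cs.length - i

-- loop body of 'advance': try one term at the cursor
-- (Python s.startswith(term, i) with 0 ≤ i is exactly "term is a prefix of s[i:]"; s[i+t] read
--  under the guard i+t < n is cs.getD (i+t) _, the default never used)
def pvAdvStep (cs : List Char) (i : Nat) (term : List Char) : Nat :=
  if PySem.Chars.startswith (cs.drop i) term && decide (i + term.length < cs.length)
      && (cs.getD (i + term.length) '?' == ' ') then
    pvSkipWs cs (i + term.length + 1)
  else i

-- def advance(i): one sweep of the term list moving the cursor
def pvAdvance (cs : List Char) (ts : List (List Char)) (i : Nat) : Nat :=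
  List.foldl (pvAdvStep cs) i ts

-- cursor bounds (cited by name in pvFixIdx's decreasing_by)
theorem pvSkipWs_ge (cs : List Char) (i : Nat) : i ≤ pvSkipWs cs i := by
  rw [pvSkipWs]
  split_ifs with h1 h2
  · have := pvSkipWs_ge cs (i + 1); omega
  · exact le_refl i
  · exact le_refl i
termination_by cs.length - i

theorem pvSkipWs_le (cs : List Char) (i : Nat) (h : i ≤ cs.length) : pvSkipWs cs i ≤ cs.length := by
  rw [pvSkipWs]
  split_ifs with h1 h2
  · exact pvSkipWs_le cs (i + 1) (by omega)
  · exact h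
  · exact h
termination_by cs.length - i

theorem pvAdvStep_ge (cs : List Char) (i : Nat) (t : List Char) : i ≤ pvAdvStep cs i t := by
  unfold pvAdvStep
  split_ifs with h
  · have := pvSkipWs_ge cs (i + t.length + 1); omega
  · exact le_refl i

theorem pvAdvStep_le (cs : List Char) (i : Nat) (t : List Char) (h : i ≤ cs.length) :
    pvAdvStep cs i t ≤ cs.length := by
  unfold pvAdvStep
  split_ifs with hc
  · simp only [Bool.and_eq_true, decide_eq_true_eq] at hc
    exact pvSkipWs_le cs (i + t.length + 1) (by omega)
  · exact h

theorem pvFoldAdv_ge (cs : List Char) : ∀ (ts : List (List Char)) (i : Nat),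
    i ≤ List.foldl (pvAdvStep cs) i ts
  | [], i => le_refl i
  | t :: ts, i => by
    simp only [List.foldl_cons]
    exact le_trans (pvAdvStep_ge cs i t) (pvFoldAdv_ge cs ts (pvAdvStep cs i t))

theorem pvFoldAdv_le (cs : List Char) : ∀ (ts : List (List Char)) (i : Nat), i ≤ cs.length →
    List.foldl (pvAdvStep cs) i ts ≤ cs.length
  | [], i, h => h
  | t :: ts, i, h => by
    simp only [List.foldl_cons]
    exact pvFoldAdv_le cs ts (pvAdvStep cs i t) (pvAdvStep_le cs i t h)

theorem pvFoldAdv_of_ge (cs : List Char) : ∀ (ts : List (List Char)) (i : Nat), cs.length ≤ i →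
    List.foldl (pvAdvStep cs) i ts = i
  | [], i, _ => rfl
  | t :: ts, i, h => by
    have hstep : pvAdvStep cs i t = i := by
      unfold pvAdvStep
      split_ifs with hc
      · simp only [Bool.and_eq_true, decide_eq_true_eq] at hc; omega
      · rfl
    simp only [List.foldl_cons, hstep]
    exact pvFoldAdv_of_ge cs ts i h

-- i = 0; j = advance(0); while j != i: i = j; j = advance(i)
def pvFixIdx (cs : List Char) (ts : List (List Char)) (i : Nat) : Nat :=
  if h : pvAdvance cs ts i = i then i
  else pvFixIdx cs ts (pvAdvance cs ts i)
termination_by cs.length + 1 - i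
decreasing_by
  have hge := pvFoldAdv_ge cs ts i
  by_cases hlen : cs.length ≤ i
  · exact absurd (pvFoldAdv_of_ge cs ts i hlen) h
  · have hle := pvFoldAdv_le cs ts i (by omega)
    simp only [pvAdvance] at *
    omega

def remove_leading_terms_py_alt (text : String) (terms : List String) : String :=
  let cs := PySem.Chars.strip text.toList
  String.ofList (List.drop (pvFixIdx cs (terms.map (fun t => t.toList)) 0) cs)

-- ===== PRECONDITION & SPEC =====
def Spec_remove_leading_terms_py (text : String) (terms : List String) (out : String) : Prop := out = remove_leading_terms_py_alt text terms
instance (text : String) (terms : List String) (out : String) : Decidable (Spec_remove_leading_terms_py text terms out) := by unfold Spec_remove_leading_terms_py; infer_instance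

-- ===== CLAIM (what is proved, stated in full; the proofs are below) =====
def Claim_equal_remove_leading_terms_py : Prop := ∀ (text : String) (terms : List String), Dom_remove_leading_terms_py text terms → Spec_remove_leading_terms_py text terms (remove_leading_terms_py text terms)

-- ===== LEMMAS AND PROOFS =====

-- t ++ [c] is a prefix of s iff t is and the next char is c
theorem pvPrefix_snoc : ∀ (t s : List Char) (c : Char),
    (t ++ [c] <+: s) ↔ (t <+: s ∧ s[t.length]? = some c)
  | [], s, c => by cases s <;> simp [List.cons_prefix_cons, eq_comm]
  | a :: t, [], c => by simp
  | a :: t, b :: s, c => by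
    simp only [List.cons_append, List.cons_prefix_cons, List.length_cons,
      List.getElem?_cons_succ]
    rw [pvPrefix_snoc t s c]
    tauto

-- lstrip of a suffix is the suffix at the whitespace-skipped cursor
theorem pvLstrip_drop (cs : List Char) (i : Nat) :
    PySem.Chars.lstrip (cs.drop i) = cs.drop (pvSkipWs cs i) := by
  rw [pvSkipWs]
  split_ifs with h1 h2
  · rw [List.drop_eq_getElem_cons h1]
    simp only [PySem.Chars.lstrip, List.dropWhile_cons, h2, if_pos]
    exact pvLstrip_drop cs (i + 1)
  · rw [List.drop_eq_getElem_cons h1]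
    simp only [PySem.Chars.lstrip, List.dropWhile_cons, h2]
    simp [← List.drop_eq_getElem_cons h1]
  · rw [List.drop_eq_nil_of_le (by omega)]
    rfl
termination_by cs.length - i

-- rstrip is the identity on suffixes of an rstripped string
theorem pvRstrip_drop (cs : List Char) (i : Nat) (hr : PySem.Chars.rstrip cs = cs) :
    PySem.Chars.rstrip (cs.drop i) = cs.drop i := by
  have hr' : List.dropWhile PySem.Chars.isspace cs.reverse = cs.reverse := by
    have := congrArg List.reverse hr
    simpa [PySem.Chars.rstrip] using this
  have key : List.dropWhile PySem.Chars.isspace (cs.drop i).reverse = (cs.drop i).reverse := by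
    rw [List.reverse_drop]
    rw [List.dropWhile_eq_self_iff] at hr' ⊢
    intro hl
    rw [List.getElem_take]
    exact hr' (by simp only [List.length_take, List.length_reverse] at hl ⊢; omega)
  simp only [PySem.Chars.rstrip, key, List.reverse_reverse]

-- strip of a suffix of an rstripped string = skip whitespace with the cursor
theorem pvStrip_drop (cs : List Char) (i : Nat) (hr : PySem.Chars.rstrip cs = cs) :
    PySem.Chars.strip (cs.drop i) = cs.drop (pvSkipWs cs i) := by
  have h1 := pvLstrip_drop cs i
  have h2 := pvRstrip_drop cs (pvSkipWs cs i) hr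
  simp only [PySem.Chars.strip, h1, h2]

-- A's prefix test on the suffix = B's cursor-based test
theorem pvStartswith_eq (cs : List Char) (i : Nat) (t : List Char) :
    PySem.Chars.startswith (cs.drop i) (t ++ [' '])
      = (PySem.Chars.startswith (cs.drop i) t && decide (i + t.length < cs.length)
          && (cs.getD (i + t.length) '?' == ' ')) := by
  rw [Bool.eq_iff_iff]
  simp only [Bool.and_eq_true, decide_eq_true_eq, beq_iff_eq, PySem.Chars.startswith_iff,
    pvPrefix_snoc, List.getElem?_drop, List.getD_eq_getElem?_getD]
  by_cases hlt : i + t.length < cs.length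
  · rw [List.getElem?_eq_getElem hlt]
    simp only [Option.getD_some, Option.some_inj]
    tauto
  · rw [List.getElem?_eq_none (by omega)]
    simp only [Option.getD_none, reduceCtorEq]
    constructor
    · rintro ⟨-, h⟩; exact absurd h (by simp)
    · rintro ⟨⟨-, h⟩, -⟩; omega

-- master lemma: A's inner for-loop over the suffix tracks B's advance, and A's flag
-- records exactly "the cursor moved"
theorem pvFoldA_idx (cs : List Char) (hr : PySem.Chars.rstrip cs = cs) :
    ∀ (ts : List (List Char)) (i : Nat) (c : Bool), i ≤ cs.length →
    (List.foldl pvStepA (cs.drop i, c) ts).1 = cs.drop (List.foldl (pvAdvStep cs) i ts) ∧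
    (List.foldl pvStepA (cs.drop i, c) ts).2
      = (c || !(decide (List.foldl (pvAdvStep cs) i ts = i))) := by
  intro ts
  induction ts with
  | nil => intro i c hi; simp
  | cons t ts ih =>
    intro i c hi
    simp only [List.foldl_cons, pvStepA, pvAdvStep]
    rw [pvStartswith_eq cs i t]
    by_cases hcond : (PySem.Chars.startswith (cs.drop i) t && decide (i + t.length < cs.length)
        && (cs.getD (i + t.length) '?' == ' ')) = true
    · simp only [hcond, if_pos]
      have hlen : i + t.length < cs.length := by
        simp only [Bool.and_eq_true, decide_eq_true_eq] at hcond
        exact hcond.1.2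
      have hstate : PySem.Chars.strip (PySem.List.slice (cs.drop i)
            (some (PySem.Chars.len (t ++ [' ']))) none)
          = cs.drop (pvSkipWs cs (i + t.length + 1)) := by
        have hslice : PySem.List.slice (cs.drop i) (some (PySem.Chars.len (t ++ [' ']))) none
            = (cs.drop i).drop (t ++ [' ']).length := by
          simpa [PySem.Chars.len] using PySem.List.slice_from_natCast (cs.drop i) (t ++ [' ']).length
        rw [hslice, List.drop_drop]
        simp only [List.length_append, List.length_cons, List.length_nil, Nat.add_assoc]
        exact pvStrip_drop cs (i + t.length + 1) hr
      rw [hstate]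
      have hi' : pvSkipWs cs (i + t.length + 1) ≤ cs.length :=
        pvSkipWs_le cs (i + t.length + 1) (by omega)
      have hih := ih (pvSkipWs cs (i + t.length + 1)) true hi'
      refine ⟨hih.1, ?_⟩
      rw [hih.2]
      have hgt : i < List.foldl (pvAdvStep cs) (pvSkipWs cs (i + t.length + 1)) ts := by
        have h1 := pvSkipWs_ge cs (i + t.length + 1)
        have h2 := pvFoldAdv_ge cs ts (pvSkipWs cs (i + t.length + 1))
        omega
      have hne : ¬ (List.foldl (pvAdvStep cs) (pvSkipWs cs (i + t.length + 1)) ts = i) := by omega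
      simp [hne]
    · simp only [hcond, if_neg, Bool.false_eq_true, not_false_iff]
      exact ih i c hi

-- the two outer loops agree
theorem pvLoop_eq (cs : List Char) (ts : List (List Char)) (hr : PySem.Chars.rstrip cs = cs)
    (i : Nat) (hi : i ≤ cs.length) :
    pvLoopA ts (cs.drop i) = cs.drop (pvFixIdx cs ts i) := by
  rw [pvLoopA, pvFixIdx]
  by_cases h0 : cs.drop i = []
  · have hil : cs.length ≤ i := by
      have := List.drop_eq_nil_iff.mp h0; omega
    have hadv : pvAdvance cs ts i = i := pvFoldAdv_of_ge cs ts i hil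
    simp [h0, hadv]
  · have hilt : i < cs.length := by
      by_contra hc
      exact h0 (List.drop_eq_nil_of_le (by omega))
    have hm := pvFoldA_idx cs hr ts i false hi
    by_cases he : List.foldl (pvAdvStep cs) i ts = i
    · have h2 : (List.foldl pvStepA (cs.drop i, false) ts).2 = false := by
        rw [hm.2]; simp [he]
      have hadv : pvAdvance cs ts i = i := he
      simp [h0, h2, hm.1, hadv, he]
    · have h2 : (List.foldl pvStepA (cs.drop i, false) ts).2 = true := by
        rw [hm.2]; simp [he]
      have hadv : ¬ (pvAdvance cs ts i = i) := he
      simp only [h0, if_neg, not_false_iff, h2, dif_pos, hadv, dite_false]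
      rw [hm.1]
      have hgt : i < List.foldl (pvAdvStep cs) i ts :=
        lt_of_le_of_ne (pvFoldAdv_ge cs ts i) (fun hx => he hx.symm)
      have hle : List.foldl (pvAdvStep cs) i ts ≤ cs.length := pvFoldAdv_le cs ts i hi
      have := pvLoop_eq cs ts hr (List.foldl (pvAdvStep cs) i ts) hle
      simpa [pvAdvance] using this
termination_by cs.length - i
decreasing_by omega

-- dropWhile is idempotent
theorem pvDropWhile_idem (p : Char → Bool) : ∀ l : List Char,
    List.dropWhile p (List.dropWhile p l) = List.dropWhile p l
  | [] => rfl
  | a :: l => by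
    by_cases h : p a = true
    · simp only [List.dropWhile_cons, h, if_pos]
      exact pvDropWhile_idem p l
    · simp [h]

-- strip leaves no trailing whitespace
theorem pvRstrip_strip (x : List Char) :
    PySem.Chars.rstrip (PySem.Chars.strip x) = PySem.Chars.strip x := by
  simp only [PySem.Chars.strip, PySem.Chars.rstrip, List.reverse_reverse]
  rw [pvDropWhile_idem]

-- ===== VERDICT (by name: the statement is the Claim_ definition above) =====
theorem remove_leading_terms_py_spec : Claim_equal_remove_leading_terms_py := by
  intro text terms _
  unfold Spec_remove_leading_terms_py remove_leading_terms_py remove_leading_terms_py_alt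
  have h := pvLoop_eq (PySem.Chars.strip text.toList) (terms.map (fun t => t.toList))
    (pvRstrip_strip text.toList) 0 (Nat.zero_le _)
  simp only [List.drop_zero] at h
  rw [h]
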